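-- pv_equiv track=rewrite | github.com/Amator80/conky-automail-suite | py/python_mail_conky_lua.py | _prefer_human
-- ===== SOURCE A (Python) =====
-- from collections import Counter
--
-- def _prefer_human(values, bad_keywords):
--     """Wybiera najbardziej 'ludzki' opis z kilku wartości."""
--     filtered = [v for v in values if v and not any(b in v.lower() for b in bad_keywords)]
--     if filtered:
--         filtered = sorted(filtered, key=lambda x: -len(x))
--         return filtered[0]
--     nonempty = [v for v in values if v]
--     if nonempty:
--         c = Counter(nonempty)
--         return c.most_common(1)[0][0]
--     return ""
-- ===== SOURCE B (Python) =====
-- def _prefer_human(values, bad_keywords):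
--     """Single pass: running longest-good value plus a frequency table for the fallback."""
--     best = None
--     counts = {}
--     for v in values:
--         if not v:
--             continue
--         counts[v] = counts.get(v, 0) + 1
--         lv = v.lower()
--         if all(b not in lv for b in bad_keywords):
--             if best is None or len(v) > len(best):
--                 best = v
--     if best is not None:
--         return best
--     top_key, top_count = "", 0
--     for k, c in counts.items():
--         if c > top_count:
--             top_key, top_count = k, c
--     return top_key
-- ===== Notes on version B (the rewrite author's own statement) =====
-- stated objective: alternative
-- what changed: A's two list comprehensions plus a full stable sort and Counter.most_common are replaced by a single pass over values that maintains a running longest-good value and a frequency dict, followed by one scan of the dict for the fallback.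
import Mathlib
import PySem

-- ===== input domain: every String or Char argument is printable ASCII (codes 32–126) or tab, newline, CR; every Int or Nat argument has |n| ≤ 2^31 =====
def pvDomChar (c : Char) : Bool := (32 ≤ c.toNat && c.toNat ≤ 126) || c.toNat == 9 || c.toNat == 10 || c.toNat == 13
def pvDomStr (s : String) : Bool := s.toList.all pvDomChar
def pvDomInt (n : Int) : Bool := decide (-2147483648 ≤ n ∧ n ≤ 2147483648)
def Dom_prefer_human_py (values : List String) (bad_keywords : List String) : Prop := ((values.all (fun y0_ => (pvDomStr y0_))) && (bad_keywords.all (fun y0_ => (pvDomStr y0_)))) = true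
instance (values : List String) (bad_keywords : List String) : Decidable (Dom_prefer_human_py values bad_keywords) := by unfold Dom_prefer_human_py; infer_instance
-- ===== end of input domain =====

-- B replaces A's two comprehensions + sort + Counter.most_common by a single pass keeping a
-- running longest-good value and a frequency table (objective: alternative single-pass decomposition).

-- ===== PORT A =====
-- A's code: filter, sort by -len (stable), take [0]; else Counter on the nonempty values, most_common(1).
def prefer_human_py (values : List String) (bad_keywords : List String) : String :=
  let filtered := values.filter (fun v =>
    (v != "") && !(bad_keywords.any (fun b => PySem.Str.isIn b (PySem.Str.lower v))))
  if filtered ≠ [] then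
    -- sorted(filtered, key=lambda x: -len(x)); filtered[0] (guard makes the list nonempty)
    (PySem.List.sorted filtered (fun x => -(PySem.Str.len x))).headD ""
  else
    let nonempty := values.filter (fun v => v != "")
    if nonempty ≠ [] then
      let c := PySem.Dict.counter nonempty
      -- c.most_common(1)[0][0]: stable sort of the items by count, descending, first key
      ((PySem.List.sorted c.items (fun p => p.2) true).headD ("", 0)).1
    else ""

-- ===== PORT B =====
-- one loop: (best so far for the longest good value, counts dict); then a scan of the counts
def prefer_human_py_alt (values : List String) (bad_keywords : List String) : String :=
  let st := values.foldl (fun (st : Option String × PySem.Dict String Int) v =>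
    if v == "" then st
    else
      let counts := st.2.insert v (st.2.getD v 0 + 1)
      let lv := PySem.Str.lower v
      if bad_keywords.all (fun b => !(PySem.Str.isIn b lv)) then
        match st.1 with
        | none => (some v, counts)
        | some best =>
          if PySem.Str.len v > PySem.Str.len best then (some v, counts) else (some best, counts)
      else (st.1, counts)) (none, PySem.Dict.empty)
  match st.1 with
  | some best => best
  | none =>
    (st.2.items.foldl (fun (t : String × Int) kv => if kv.2 > t.2 then kv else t) ("", 0)).1

-- ===== PRECONDITION & SPEC =====
def Spec_prefer_human_py (values : List String) (bad_keywords : List String) (out : String) : Prop := out = prefer_human_py_alt values bad_keywords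
instance (values : List String) (bad_keywords : List String) (out : String) : Decidable (Spec_prefer_human_py values bad_keywords out) := by unfold Spec_prefer_human_py; infer_instance

-- ===== CLAIM (what is proved, stated in full; the proofs are below) =====
def Claim_equal_prefer_human_py : Prop := ∀ (values : List String) (bad_keywords : List String), Dom_prefer_human_py values bad_keywords → Spec_prefer_human_py values bad_keywords (prefer_human_py values bad_keywords)

-- ===== LEMMAS AND PROOFS =====

-- the "first element of maximal key" fold, as an Option accumulator
def pvBest {α : Type} (gt : α → α → Bool) (acc : Option α) (x : α) : Option α :=
  match acc with
  | none => some x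
  | some b => if gt x b then some x else some b

-- head of the stable ascending sort = left fold keeping the first strictly-smaller-key element
theorem head?_sorted_eq_foldl {α : Type} (key : α → Int) (l : List α) :
    (PySem.List.sorted l key).head? = l.foldl (pvBest (fun x b => decide (key x < key b))) none := by
  induction l using List.reverseRecOn with
  | nil => simp [PySem.List.sorted_eq_foldl_insertBy]
  | append_singleton l x ih =>
    rw [PySem.List.sorted_eq_foldl_insertBy] at ih ⊢
    rw [List.foldl_append, List.foldl_append]
    simp only [List.foldl_cons, List.foldl_nil]
    rcases h : List.foldl (fun acc x => PySem.List.insertBy (fun a b => decide (key a < key b)) x acc) [] l with _ | ⟨y, t⟩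
    · simp [h] at ih
      simp [PySem.List.insertBy, pvBest, ← ih]
    · simp [h] at ih
      simp only [PySem.List.insertBy, ← ih, pvBest]
      split <;> simp

-- head of the stable descending sort = left fold keeping the first strictly-greater-key element
theorem head?_sorted_rev_eq_foldl {α : Type} (key : α → Int) (l : List α) :
    (PySem.List.sorted l key true).head? = l.foldl (pvBest (fun x b => decide (key b < key x))) none := by
  induction l using List.reverseRecOn with
  | nil => simp [PySem.List.sorted_rev_eq_foldl_insertBy]
  | append_singleton l x ih =>
    rw [PySem.List.sorted_rev_eq_foldl_insertBy] at ih ⊢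
    rw [List.foldl_append, List.foldl_append]
    simp only [List.foldl_cons, List.foldl_nil]
    rcases h : List.foldl (fun acc x => PySem.List.insertBy (fun a b => decide (key b < key a)) x acc) [] l with _ | ⟨y, t⟩
    · simp [h] at ih
      simp [PySem.List.insertBy, pvBest, ← ih]
    · simp [h] at ih
      simp only [PySem.List.insertBy, ← ih, pvBest]
      split <;> simp

theorem foldl_pvBest_some {α : Type} (gt : α → α → Bool) (l : List α) (b : α) :
    l.foldl (pvBest gt) (some b) = some (l.foldl (fun b x => if gt x b then x else b) b) := by
  induction l generalizing b with
  | nil => rfl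
  | cons x xs ih => simp only [List.foldl_cons, pvBest]; split <;> simp [ih]

-- splitting B's paired loop into the best-fold over A's filtered list and the count-fold over the nonempty list
theorem pv_loop_split (bad_keywords : List String) (vs : List String)
    (b0 : Option String) (d0 : PySem.Dict String Int) :
    vs.foldl (fun (st : Option String × PySem.Dict String Int) v =>
      if v == "" then st
      else
        let counts := st.2.insert v (st.2.getD v 0 + 1)
        let lv := PySem.Str.lower v
        if bad_keywords.all (fun b => !(PySem.Str.isIn b lv)) then
          match st.1 with
          | none => (some v, counts)
          | some best =>
            if PySem.Str.len v > PySem.Str.len best then (some v, counts) else (some best, counts)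
        else (st.1, counts)) (b0, d0)
    = ((vs.filter (fun v => (v != "") && !(bad_keywords.any (fun b => PySem.Str.isIn b (PySem.Str.lower v))))).foldl
         (pvBest (fun x b => decide (PySem.Str.len b < PySem.Str.len x))) b0,
       (vs.filter (fun v => v != "")).foldl (fun d v => d.insert v (d.getD v 0 + 1)) d0) := by
  induction vs generalizing b0 d0 with
  | nil => rfl
  | cons v vs ih =>
    rw [List.foldl_cons, List.filter_cons, List.filter_cons]
    simp only []
    by_cases hv : v = ""
    · subst hv
      rw [if_pos (by decide : (("" : String) == "") = true)]
      rw [if_neg (by simp), if_neg (by simp)]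
      exact ih b0 d0
    · rw [if_neg (by simp [hv] : ¬((v == "") = true))]
      by_cases hg : (bad_keywords.all fun b => !PySem.Str.isIn b (PySem.Str.lower v)) = true
      · have hany : (bad_keywords.any (fun b => PySem.Str.isIn b (PySem.Str.lower v))) = false := by
          simpa [List.all_eq_true, List.any_eq_false] using hg
        rw [if_pos hg, if_pos (by rw [hany]; simp [hv]), if_pos (by simp [hv])]
        rw [List.foldl_cons, List.foldl_cons]
        cases b0 with
        | none => exact ih _ _
        | some b =>
          dsimp only [pvBest]
          by_cases hl : PySem.Str.len v > PySem.Str.len b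
          · rw [if_pos hl, if_pos (by simpa using hl)]
            exact ih _ _
          · rw [if_neg hl, if_neg (by simpa using hl)]
            exact ih _ _
      · have hany : (bad_keywords.any (fun b => PySem.Str.isIn b (PySem.Str.lower v))) = true := by
          rcases List.all_eq_false.mp (Bool.eq_false_iff.mpr hg) with ⟨b, hb, hbb⟩
          exact List.any_eq_true.mpr ⟨b, hb, by simpa using hbb⟩
        rw [if_neg hg, if_neg (by rw [hany]; simp), if_pos (by simp [hv])]
        rw [List.foldl_cons]
        exact ih _ _

-- every count in Counter(xs) is positive
theorem pv_counter_item_pos {κ : Type} [BEq κ] [LawfulBEq κ] (xs : List κ) (p : κ × Int)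
    (hp : p ∈ (PySem.Dict.counter xs).items) : 0 < p.2 := by
  rw [PySem.Dict.items_counter] at hp
  rcases List.mem_map.mp hp with ⟨k, hk, rfl⟩
  have : k ∈ xs := (PySem.Set.mem_ofList _ _).mp hk
  have := List.count_pos_iff.mpr this
  simp
  omega

-- ===== VERDICT (by name: the statement is the Claim_ definition above) =====
theorem prefer_human_py_spec : Claim_equal_prefer_human_py := by
  intro values bad_keywords _
  unfold Spec_prefer_human_py prefer_human_py prefer_human_py_alt
  rw [pv_loop_split]
  simp only []
  set filtered := values.filter (fun v =>
    (v != "") && !(bad_keywords.any (fun b => PySem.Str.isIn b (PySem.Str.lower v)))) with hf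
  set nonempty := values.filter (fun v => v != "") with hn
  rw [PySem.Dict.foldl_insert_getD_add_one_eq_counter]
  by_cases hfe : filtered = []
  · -- no good value: B's best is none
    simp only [hfe, List.foldl_nil]
    rw [if_neg (by simp)]
    by_cases hne : nonempty = []
    · simp only [hne]; rfl
    · rw [if_pos hne]
      -- both sides pick the first item of maximal count
      rcases hit : (PySem.Dict.counter nonempty).items with _ | ⟨q, rest⟩
      · exfalso
        rw [PySem.Dict.items_counter] at hit
        rcases List.exists_mem_of_ne_nil nonempty hne with ⟨h0, hh0⟩
        have : h0 ∈ PySem.Set.ofList nonempty := (PySem.Set.mem_ofList _ _).mpr hh0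
        rw [List.map_eq_nil_iff.mp hit] at this
        exact List.not_mem_nil this
      · have hq : 0 < q.2 := pv_counter_item_pos nonempty q (by rw [hit]; exact List.mem_cons_self)
        rw [List.headD_eq_head?_getD, head?_sorted_rev_eq_foldl]
        simp only [List.foldl_cons]
        dsimp only [pvBest]
        rw [if_pos hq, foldl_pvBest_some, Option.getD_some]
        simp only [decide_eq_true_eq, gt_iff_lt]
  · -- a good value exists: both return first longest of filtered
    rcases hfl : filtered with _ | ⟨f, fs⟩
    · exact absurd hfl hfe
    · rw [if_pos (by simp)]
      rw [List.headD_eq_head?_getD, head?_sorted_eq_foldl]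
      have hkey : (fun (x b : String) => decide (-(PySem.Str.len x) < -(PySem.Str.len b)))
           = (fun (x b : String) => decide (PySem.Str.len b < PySem.Str.len x)) := by
        funext x b; simp
      rw [hkey]
      simp only [List.foldl_cons]
      dsimp only [pvBest]
      rw [foldl_pvBest_some, Option.getD_some]
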